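-- pv_equiv track=rewrite | github.com/henok-getahun/Leetcode-solutions | 34-find-first-and-last-position-of-element-in-sorted-array/find-first-and-last-position-of-element-in-sorted-array.py | getStarting
-- ===== SOURCE A (Python) =====
-- def getStarting(nums,target):
--     left=0
--     right=len(nums)-1
--     while left<=right:
--         mid = (left + right)//2
--         if nums[mid] == target:
--             if mid == 0 or nums[mid-1] != target :
--                 return mid
--             right -= 1
--         elif nums[mid] > target:
--             right = mid - 1
--         else:
--              left = mid + 1
--     return -1
-- ===== SOURCE B (Python) =====
-- def getStarting(nums, target):
--     # leftmost-insertion-point binary search (bisect_left style), then a single membership check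
--     lo, hi = 0, len(nums)
--     while lo < hi:
--         mid = (lo + hi) // 2
--         if nums[mid] < target:
--             lo = mid + 1
--         else:
--             hi = mid
--     if lo < len(nums) and nums[lo] == target:
--         return lo
--     return -1
-- ===== Notes on version B (the rewrite author's own statement) =====
-- stated objective: alternative
-- what changed: A's binary search returns early on a boundary test and steps right-=1 through a run of equal elements; B computes the leftmost insertion point with a pure bisect_left-style loop and one final membership check; Pre_ excludes unsorted lists containing the target, where both binary searches return an index that is an accident of the probing order.
-- outside the precondition, e.g. on getStarting([1, 0], 1): A returns 0, B returns -1
import Mathlib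
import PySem

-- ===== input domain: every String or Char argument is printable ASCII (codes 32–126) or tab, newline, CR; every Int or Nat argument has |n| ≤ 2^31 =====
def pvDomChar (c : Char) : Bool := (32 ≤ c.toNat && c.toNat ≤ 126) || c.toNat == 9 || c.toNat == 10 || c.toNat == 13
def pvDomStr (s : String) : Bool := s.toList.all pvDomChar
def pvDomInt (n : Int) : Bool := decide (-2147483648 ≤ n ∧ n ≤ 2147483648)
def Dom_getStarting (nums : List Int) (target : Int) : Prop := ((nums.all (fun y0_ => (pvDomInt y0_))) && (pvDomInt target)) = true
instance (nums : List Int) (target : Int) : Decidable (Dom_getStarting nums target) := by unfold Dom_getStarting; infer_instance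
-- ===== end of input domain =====

-- B replaces A's boundary-testing binary search (which steps right -= 1 through a run of equal
-- elements) by a bisect_left-style leftmost-insertion-point search plus one final membership
-- check; objective: alternative (same measured cost on random inputs).

-- ===== PORT A =====
-- the while-loop of A as recursion on the shrinking window [left, right]
def goA (nums : List Int) (target : Int) (left right : Int) : Int :=
  if h : left ≤ right then
    let mid := PySem.Int.floordiv (left + right) 2
    match PySem.List.pyGet? nums mid with
    | none => -1  -- Python would raise IndexError; unreachable from getStarting's initial bounds
    | some v =>
      if v = target then
        if mid = 0 ∨ PySem.List.pyGet? nums (mid - 1) ≠ some target then mid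
        else goA nums target left (right - 1)
      else if v > target then goA nums target left (mid - 1)
      else goA nums target (mid + 1) right
  else -1
termination_by (right + 1 - left).toNat
decreasing_by
  · omega
  · have := PySem.Int.floordiv_two_mid_bounds h; omega
  · have := PySem.Int.floordiv_two_mid_bounds h; omega

def getStarting (nums : List Int) (target : Int) : Int :=
  goA nums target 0 ((nums.length : Int) - 1)

-- ===== PORT B =====
-- the while-loop of B: leftmost insertion point for target in nums[lo:hi]
def goB (nums : List Int) (target : Int) (lo hi : Int) : Int :=
  if h : lo < hi then
    let mid := PySem.Int.floordiv (lo + hi) 2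
    match PySem.List.pyGet? nums mid with
    | none => -1  -- Python would raise IndexError; unreachable from getStarting_alt's initial bounds
    | some v =>
      if v < target then goB nums target (mid + 1) hi
      else goB nums target lo mid
  else lo
termination_by (hi - lo).toNat
decreasing_by
  · have := PySem.Int.floordiv_two_mid_bounds (le_of_lt h); omega
  · have h1 := PySem.Int.floordiv_two_mid_bounds (le_of_lt h)
    have h2 : PySem.Int.floordiv (lo + hi) 2 < hi :=
      (PySem.Int.floordiv_lt_iff_lt_mul (by omega)).mpr (by omega)
    omega

def getStarting_alt (nums : List Int) (target : Int) : Int :=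
  let lo := goB nums target 0 (nums.length : Int)
  if lo < (nums.length : Int) ∧ PySem.List.pyGet? nums lo = some target then lo else -1

-- ===== PRECONDITION & SPEC =====
-- Pre_ excludes unsorted lists that contain the target: there both programs' binary-search
-- probing reads arbitrary elements and the returned index is an accident of the probing order
-- (A still returns a value there, e.g. ([1,0],1) ↦ 0 while B returns -1); the function's
-- stated domain is a sorted array. (When the target is absent both return -1 even on
-- unsorted input, so those inputs stay inside Pre_.)
def Pre_getStarting (nums : List Int) (target : Int) : Prop :=
  List.Pairwise (· ≤ ·) nums ∨ target ∉ nums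
instance (nums : List Int) (target : Int) : Decidable (Pre_getStarting nums target) := by
  unfold Pre_getStarting; infer_instance

def pvWitness_getStarting : List Int × Int := ([1, 2, 2, 3], 2)

def Spec_getStarting (nums : List Int) (target : Int) (out : Int) : Prop := out = getStarting_alt nums target
instance (nums : List Int) (target : Int) (out : Int) : Decidable (Spec_getStarting nums target out) := by unfold Spec_getStarting; infer_instance

-- ===== CLAIM (what is proved, stated in full; the proofs are below) =====
def Claim_equal_getStarting : Prop := ∀ (nums : List Int) (target : Int), Dom_getStarting nums target → Pre_getStarting nums target → Spec_getStarting nums target (getStarting nums target)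

-- ===== LEMMAS AND PROOFS =====

-- index of the first occurrence of target, else -1: the common value of both programs on sorted input
def firstIdx (nums : List Int) (target : Int) : Int :=
  match nums.findIdx? (· == target) with
  | some j => (j : Int)
  | none => -1

lemma goA_step (nums : List Int) (target left right : Int) (h : left ≤ right) :
    goA nums target left right =
      (match PySem.List.pyGet? nums (PySem.Int.floordiv (left + right) 2) with
      | none => -1
      | some v =>
        if v = target then
          if PySem.Int.floordiv (left + right) 2 = 0 ∨
              PySem.List.pyGet? nums (PySem.Int.floordiv (left + right) 2 - 1) ≠ some target then
            PySem.Int.floordiv (left + right) 2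
          else goA nums target left (right - 1)
        else if v > target then goA nums target left (PySem.Int.floordiv (left + right) 2 - 1)
        else goA nums target (PySem.Int.floordiv (left + right) 2 + 1) right) := by
  rw [goA]
  simp only [dif_pos h]

lemma goA_eq (nums : List Int) (target : Int)
    (hmono : ∀ (i j : Nat) (hi : i < nums.length) (hj : j < nums.length), i ≤ j → nums[i] ≤ nums[j]) :
    ∀ (left right : Int), 0 ≤ left → right ≤ (nums.length : Int) - 1 →
      (∀ j : Nat, nums.findIdx? (· == target) = some j → left ≤ (j : Int) ∧ (j : Int) ≤ right) →
      goA nums target left right = firstIdx nums target := by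
  intro left right
  induction left, right using goA.induct nums target with
  | case1 left right h mid hnone =>
      intro h0 hr hinv
      exfalso
      have hm := PySem.Int.floordiv_two_mid_bounds h
      have h2 : PySem.List.pyGet? nums (PySem.Int.floordiv (left + right) 2) = none := hnone
      rw [PySem.List.pyGet?_eq_some_getElem nums (by omega) (by omega)] at h2
      simp at h2
  | case2 left right h mid hc hv =>
      intro h0 hr hinv
      have hm := PySem.Int.floordiv_two_mid_bounds h
      have hv' : PySem.List.pyGet? nums (PySem.Int.floordiv (left + right) 2) = some target := hv
      have hc' : PySem.Int.floordiv (left + right) 2 = 0 ∨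
          PySem.List.pyGet? nums (PySem.Int.floordiv (left + right) 2 - 1) ≠ some target := hc
      have hmn : (PySem.Int.floordiv (left + right) 2).toNat < nums.length := by omega
      have hvm : nums[(PySem.Int.floordiv (left + right) 2).toNat] = target := by
        rw [PySem.List.pyGet?_eq_some_getElem nums (by omega) (by omega)] at hv'
        exact Option.some.inj hv'
      have hmin : ∀ (k : Nat) (hk : k < (PySem.Int.floordiv (left + right) 2).toNat),
          ¬ (nums[k]'(by omega) == target) = true := by
        intro k hk
        have hmpos : (1 : Int) ≤ PySem.Int.floordiv (left + right) 2 := by omega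
        rcases hc' with hz | hne
        · omega
        · have hprev : nums[(PySem.Int.floordiv (left + right) 2 - 1).toNat]'(by omega) ≠ target := by
            intro hEq
            exact hne (by
              rw [PySem.List.pyGet?_eq_some_getElem nums (by omega) (by omega), hEq])
          have h1 : nums[(PySem.Int.floordiv (left + right) 2 - 1).toNat]'(by omega) ≤
              nums[(PySem.Int.floordiv (left + right) 2).toNat] := hmono _ _ (by omega) hmn (by omega)
          have h2 : nums[k]'(by omega) ≤
              nums[(PySem.Int.floordiv (left + right) 2 - 1).toNat]'(by omega) :=
            hmono _ _ (by omega) (by omega) (by omega)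
          simp only [beq_iff_eq]
          omega
      have hF : nums.findIdx? (· == target) = some (PySem.Int.floordiv (left + right) 2).toNat :=
        List.findIdx?_eq_some_iff_getElem.mpr ⟨hmn, by simp only [beq_iff_eq]; exact hvm, hmin⟩
      have hstep : goA nums target left right = PySem.Int.floordiv (left + right) 2 := by
        rw [goA_step nums target left right h, hv']
        dsimp only
        rw [if_pos (show target = target from rfl), if_pos hc']
      rw [hstep]
      unfold firstIdx
      rw [hF]
      show PySem.Int.floordiv (left + right) 2 = ((PySem.Int.floordiv (left + right) 2).toNat : Int)
      omega
  | case3 left right h mid hc hv IH =>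
      intro h0 hr hinv
      have hm := PySem.Int.floordiv_two_mid_bounds h
      have hv' : PySem.List.pyGet? nums (PySem.Int.floordiv (left + right) 2) = some target := hv
      have hc' : ¬ (PySem.Int.floordiv (left + right) 2 = 0 ∨
          PySem.List.pyGet? nums (PySem.Int.floordiv (left + right) 2 - 1) ≠ some target) := hc
      push_neg at hc'
      obtain ⟨hnz, hprev⟩ := hc'
      have hmpos : (1 : Int) ≤ PySem.Int.floordiv (left + right) 2 := by omega
      have hpm : nums[(PySem.Int.floordiv (left + right) 2 - 1).toNat]'(by omega) = target := by
        rw [PySem.List.pyGet?_eq_some_getElem nums (by omega) (by omega)] at hprev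
        exact Option.some.inj hprev
      have hstep : goA nums target left right = goA nums target left (right - 1) := by
        rw [goA_step nums target left right h, hv']
        dsimp only
        rw [if_pos (show target = target from rfl), if_neg hc]
      rw [hstep]
      refine IH h0 (by omega) ?_
      intro j hj
      obtain ⟨hjlt, hpj, hjmin⟩ := List.findIdx?_eq_some_iff_getElem.mp hj
      have hold := hinv j hj
      have hjle : j ≤ (PySem.Int.floordiv (left + right) 2 - 1).toNat := by
        by_contra hgt
        exact hjmin ((PySem.Int.floordiv (left + right) 2 - 1).toNat) (by omega)
          (by simp only [beq_iff_eq]; exact hpm)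
      omega
  | case4 left right h mid v hv hne hgt IH =>
      intro h0 hr hinv
      have hm := PySem.Int.floordiv_two_mid_bounds h
      have hv' : PySem.List.pyGet? nums (PySem.Int.floordiv (left + right) 2) = some v := hv
      have hvm : nums[(PySem.Int.floordiv (left + right) 2).toNat]'(by omega) = v := by
        rw [PySem.List.pyGet?_eq_some_getElem nums (by omega) (by omega)] at hv'
        exact Option.some.inj hv'
      have hstep : goA nums target left right =
          goA nums target left (PySem.Int.floordiv (left + right) 2 - 1) := by
        rw [goA_step nums target left right h, hv']
        dsimp only
        rw [if_neg hne, if_pos hgt]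
      rw [hstep]
      refine IH h0 (by omega) ?_
      intro j hj
      obtain ⟨hjlt, hpj, hjmin⟩ := List.findIdx?_eq_some_iff_getElem.mp hj
      have hjt : nums[j] = target := by simpa using hpj
      have hold := hinv j hj
      have hjlt2 : j < (PySem.Int.floordiv (left + right) 2).toNat := by
        by_contra hge
        have : nums[(PySem.Int.floordiv (left + right) 2).toNat]'(by omega) ≤ nums[j] :=
          hmono _ _ (by omega) hjlt (by omega)
        omega
      omega
  | case5 left right h mid v hv hne hngt IH =>
      intro h0 hr hinv
      have hm := PySem.Int.floordiv_two_mid_bounds h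
      have hv' : PySem.List.pyGet? nums (PySem.Int.floordiv (left + right) 2) = some v := hv
      have hvm : nums[(PySem.Int.floordiv (left + right) 2).toNat]'(by omega) = v := by
        rw [PySem.List.pyGet?_eq_some_getElem nums (by omega) (by omega)] at hv'
        exact Option.some.inj hv'
      have hstep : goA nums target left right =
          goA nums target (PySem.Int.floordiv (left + right) 2 + 1) right := by
        rw [goA_step nums target left right h, hv']
        dsimp only
        rw [if_neg hne, if_neg hngt]
      rw [hstep]
      refine IH (by omega) hr ?_
      intro j hj
      obtain ⟨hjlt, hpj, hjmin⟩ := List.findIdx?_eq_some_iff_getElem.mp hj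
      have hjt : nums[j] = target := by simpa using hpj
      have hold := hinv j hj
      have hjgt : (PySem.Int.floordiv (left + right) 2).toNat < j := by
        by_contra hle2
        have : nums[j] ≤ nums[(PySem.Int.floordiv (left + right) 2).toNat]'(by omega) :=
          hmono _ _ hjlt (by omega) (by omega)
        omega
      omega
  | case6 left right hnle =>
      intro h0 hr hinv
      have hstep : goA nums target left right = -1 := by
        rw [goA]; simp only [dif_neg hnle]
      rw [hstep]
      unfold firstIdx
      cases hF : nums.findIdx? (· == target) with
      | some j => have := hinv j hF; omega
      | none => rfl

lemma goB_spec (nums : List Int) (target : Int)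
    (hmono : ∀ (i j : Nat) (hi : i < nums.length) (hj : j < nums.length), i ≤ j → nums[i] ≤ nums[j]) :
    ∀ (lo hi : Int), 0 ≤ lo → lo ≤ hi → hi ≤ (nums.length : Int) →
      (∀ i : Nat, (hi' : i < nums.length) → (i : Int) < lo → nums[i] < target) →
      (∀ i : Nat, (hi' : i < nums.length) → hi ≤ (i : Int) → target ≤ nums[i]) →
      0 ≤ goB nums target lo hi ∧ goB nums target lo hi ≤ (nums.length : Int) ∧
      (∀ i : Nat, (hi' : i < nums.length) → (i : Int) < goB nums target lo hi → nums[i] < target) ∧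
      (∀ i : Nat, (hi' : i < nums.length) → goB nums target lo hi ≤ (i : Int) → target ≤ nums[i]) := by
  intro lo hi
  induction lo, hi using goB.induct nums target with
  | case1 lo hi hlt mid hnone =>
      intro h0 hlh hn I1 I2
      exfalso
      have hm := PySem.Int.floordiv_two_mid_bounds (le_of_lt hlt)
      have hmlt : PySem.Int.floordiv (lo + hi) 2 < hi :=
        (PySem.Int.floordiv_lt_iff_lt_mul (by omega)).mpr (by omega)
      have h2 : PySem.List.pyGet? nums (PySem.Int.floordiv (lo + hi) 2) = none := hnone
      rw [PySem.List.pyGet?_eq_some_getElem nums (by omega) (by omega)] at h2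
      simp at h2
  | case2 lo hi hlt mid v hv hvlt IH =>
      intro h0 hlh hn I1 I2
      have hm := PySem.Int.floordiv_two_mid_bounds (le_of_lt hlt)
      have hmlt : PySem.Int.floordiv (lo + hi) 2 < hi :=
        (PySem.Int.floordiv_lt_iff_lt_mul (by omega)).mpr (by omega)
      have hv' : PySem.List.pyGet? nums (PySem.Int.floordiv (lo + hi) 2) = some v := hv
      have hveq : v = nums[(PySem.Int.floordiv (lo + hi) 2).toNat]'(by omega) := by
        rw [PySem.List.pyGet?_eq_some_getElem nums (by omega) (by omega)] at hv'
        exact (Option.some.inj hv').symm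
      have hstep : goB nums target lo hi = goB nums target (PySem.Int.floordiv (lo + hi) 2 + 1) hi := by
        rw [goB]
        simp only [dif_pos hlt, hv', if_pos hvlt]
      rw [hstep]
      refine IH (by omega) (by omega) hn ?_ I2
      intro i hi' hilt
      rcases lt_or_ge (i : Int) lo with hc | hc
      · exact I1 i hi' hc
      · have : nums[i] ≤ nums[(PySem.Int.floordiv (lo + hi) 2).toNat]'(by omega) :=
          hmono i _ hi' (by omega) (by omega)
        omega
  | case3 lo hi hlt mid v hv hvge IH =>
      intro h0 hlh hn I1 I2
      have hm := PySem.Int.floordiv_two_mid_bounds (le_of_lt hlt)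
      have hmlt : PySem.Int.floordiv (lo + hi) 2 < hi :=
        (PySem.Int.floordiv_lt_iff_lt_mul (by omega)).mpr (by omega)
      have hv' : PySem.List.pyGet? nums (PySem.Int.floordiv (lo + hi) 2) = some v := hv
      have hveq : v = nums[(PySem.Int.floordiv (lo + hi) 2).toNat]'(by omega) := by
        rw [PySem.List.pyGet?_eq_some_getElem nums (by omega) (by omega)] at hv'
        exact (Option.some.inj hv').symm
      have hstep : goB nums target lo hi = goB nums target lo (PySem.Int.floordiv (lo + hi) 2) := by
        rw [goB]
        simp only [dif_pos hlt, hv', if_neg hvge]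
      rw [hstep]
      refine IH (by omega) (by omega) (by omega) I1 ?_
      intro i hi' hige
      have : nums[(PySem.Int.floordiv (lo + hi) 2).toNat]'(by omega) ≤ nums[i] :=
        hmono _ i (by omega) hi' (by omega)
      omega
  | case4 lo hi hnlt =>
      intro h0 hlh hn I1 I2
      have hstep : goB nums target lo hi = lo := by
        rw [goB]; simp only [dif_neg hnlt]
      rw [hstep]
      exact ⟨h0, by omega, I1, fun i hi' hge => I2 i hi' (by omega)⟩

lemma alt_eq (nums : List Int) (target : Int)
    (hmono : ∀ (i j : Nat) (hi : i < nums.length) (hj : j < nums.length), i ≤ j → nums[i] ≤ nums[j]) :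
    getStarting_alt nums target = firstIdx nums target := by
  obtain ⟨h0, hle, I1, I2⟩ :=
    goB_spec nums target hmono 0 (nums.length : Int) le_rfl (Int.natCast_nonneg _) le_rfl
      (fun i hi' hlt => absurd hlt (by omega))
      (fun i hi' hge => absurd hge (by omega))
  unfold getStarting_alt firstIdx
  cases hF : nums.findIdx? (· == target) with
  | some j =>
      obtain ⟨hj, hpj, hmin⟩ := List.findIdx?_eq_some_iff_getElem.mp hF
      have hj' : nums[j] = target := by simpa using hpj
      have hrj : goB nums target 0 (nums.length : Int) = (j : Int) := by
        by_contra hne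
        rcases lt_or_gt_of_ne hne with hc | hc
        · -- r < j : nums[r] would be an earlier occurrence
          have hrn : (goB nums target 0 (nums.length : Int)).toNat < j := by omega
          have hub : nums[(goB nums target 0 (nums.length : Int)).toNat]'(by omega) ≤ nums[j] :=
            hmono _ j (by omega) hj (by omega)
          have hlb := I2 (goB nums target 0 (nums.length : Int)).toNat (by omega) (by omega)
          have := hmin _ hrn
          simp only [beq_iff_eq] at this
          omega
        · -- j < r : contradicts that everything below r is < target
          have := I1 j hj (by omega)
          omega
      have hcond : goB nums target 0 (nums.length : Int) < (nums.length : Int) ∧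
          PySem.List.pyGet? nums (goB nums target 0 (nums.length : Int)) = some target := by
        constructor
        · omega
        · rw [hrj, PySem.List.pyGet?_natCast]
          simp [List.getElem?_eq_getElem hj, hj']
      rw [if_pos hcond, hrj]
  | none =>
      have hall := List.findIdx?_eq_none_iff.mp hF
      rw [if_neg]
      rintro ⟨hlt, hget⟩
      have hmem := PySem.List.mem_of_pyGet?_eq_some _ hget
      have := hall target hmem
      simp at this

-- ===== VERDICT (by name: the statement is the Claim_ definition above) =====
lemma goA_absent (nums : List Int) (target : Int) (habs : target ∉ nums) :
    ∀ (left right : Int), goA nums target left right = -1 := by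
  intro left right
  induction left, right using goA.induct nums target with
  | case1 left right h mid hnone =>
      have h2 : PySem.List.pyGet? nums (PySem.Int.floordiv (left + right) 2) = none := hnone
      rw [goA_step nums target left right h, h2]
  | case2 left right h mid hc hv =>
      exact absurd (PySem.List.mem_of_pyGet?_eq_some _ hv) habs
  | case3 left right h mid hc hv IH =>
      exact absurd (PySem.List.mem_of_pyGet?_eq_some _ hv) habs
  | case4 left right h mid v hv hne hgt IH =>
      have hv' : PySem.List.pyGet? nums (PySem.Int.floordiv (left + right) 2) = some v := hv
      rw [goA_step nums target left right h, hv']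
      dsimp only
      rw [if_neg hne, if_pos hgt]
      exact IH
  | case5 left right h mid v hv hne hngt IH =>
      have hv' : PySem.List.pyGet? nums (PySem.Int.floordiv (left + right) 2) = some v := hv
      rw [goA_step nums target left right h, hv']
      dsimp only
      rw [if_neg hne, if_neg hngt]
      exact IH
  | case6 left right hnle =>
      rw [goA]; simp only [dif_neg hnle]

lemma alt_absent (nums : List Int) (target : Int) (habs : target ∉ nums) :
    getStarting_alt nums target = -1 := by
  unfold getStarting_alt
  rw [if_neg]
  rintro ⟨-, hget⟩
  exact habs (PySem.List.mem_of_pyGet?_eq_some _ hget)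

theorem getStarting_spec : Claim_equal_getStarting := by
  intro nums target _hdom hpre
  unfold Pre_getStarting at hpre
  rcases hpre with hpre | habs
  case inr =>
    unfold Spec_getStarting
    rw [alt_absent nums target habs]
    unfold getStarting
    exact goA_absent nums target habs 0 _
  have hmono : ∀ (i j : Nat) (hi : i < nums.length) (hj : j < nums.length),
      i ≤ j → nums[i] ≤ nums[j] := by
    intro i j hi hj hij
    rcases Nat.lt_or_ge i j with hlt | hge
    · exact List.pairwise_iff_getElem.mp hpre i j hi hj hlt
    · have : i = j := by omega
      subst this; exact le_refl _
  unfold Spec_getStarting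
  rw [alt_eq nums target hmono]
  unfold getStarting
  apply goA_eq nums target hmono 0 ((nums.length : Int) - 1) le_rfl le_rfl
  intro j hj
  obtain ⟨hjlt, -, -⟩ := List.findIdx?_eq_some_iff_getElem.mp hj
  exact ⟨Int.natCast_nonneg _, by omega⟩
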